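-- pv_equiv track=rewrite | github.com/kamranhasan/indirect-prompt-injection-poc | app.py | _sanitize_content
-- ===== SOURCE A (Python) =====
-- def _sanitize_content(content):
--     """
--     Sanitize content to remove potential injection attempts
--     """
--     # Limit length
--     max_length = 2000
--     if len(content) > max_length:
--         content = content[:max_length] + "... [truncated]"
--
--     # Remove common injection markers
--     dangerous_phrases = [
--         'SYSTEM INSTRUCTION:', 'IGNORE PREVIOUS', 'NEW INSTRUCTION:',
--         'OVERRIDE:', '[SYSTEM]', 'IMPORTANT INSTRUCTION FOR AI'
--     ]
--
--     for phrase in dangerous_phrases: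
--         content = content.replace(phrase, '[FILTERED]')
--
--     return content
-- ===== SOURCE B (Python) =====
-- def _sanitize_content(content):
--     # Same sanitizer, restructured: recursion over the phrase list, and each pass
--     # rebuilds the string non-destructively as '[FILTERED]'.join(text.split(phrase))
--     # instead of mutating it with str.replace in a for loop.
--     if len(content) > 2000:
--         content = content[:2000] + "... [truncated]"
--
--     def scrub(text, phrases):
--         if not phrases:
--             return text
--         return scrub('[FILTERED]'.join(text.split(phrases[0])), phrases[1:])
--
--     return scrub(content, ['SYSTEM INSTRUCTION:', 'IGNORE PREVIOUS', 'NEW INSTRUCTION:',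
--                            'OVERRIDE:', '[SYSTEM]', 'IMPORTANT INSTRUCTION FOR AI'])
-- ===== Notes on version B (the rewrite author's own statement) =====
-- stated objective: alternative
-- what changed: The destructive for-loop of str.replace passes is replaced by a recursion over the phrase list where each pass rebuilds the string functionally as '[FILTERED]'.join(text.split(phrase)).
import Mathlib
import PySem

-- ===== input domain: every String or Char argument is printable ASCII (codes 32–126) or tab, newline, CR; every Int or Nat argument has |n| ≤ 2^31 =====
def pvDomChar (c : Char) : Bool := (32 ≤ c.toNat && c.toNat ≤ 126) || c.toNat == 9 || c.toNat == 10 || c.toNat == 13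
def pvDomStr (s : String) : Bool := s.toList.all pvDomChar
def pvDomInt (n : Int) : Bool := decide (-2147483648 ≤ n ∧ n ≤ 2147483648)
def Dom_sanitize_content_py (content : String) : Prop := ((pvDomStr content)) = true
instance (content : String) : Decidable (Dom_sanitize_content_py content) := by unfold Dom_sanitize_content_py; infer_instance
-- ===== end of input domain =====

-- B restructures the sanitizer: recursion over the phrase list with each pass rebuilt
-- as '[FILTERED]'.join(text.split(phrase)) instead of a for-loop of str.replace calls;
-- same truncation guard, proved to return the same string on every input.


-- ===== PORT A =====
def sanitize_content_py (content : String) : String :=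
  let content :=
    if PySem.Str.len content > 2000 then
      PySem.Str.slice content none (some 2000) ++ "... [truncated]"
    else content
  ["SYSTEM INSTRUCTION:", "IGNORE PREVIOUS", "NEW INSTRUCTION:",
   "OVERRIDE:", "[SYSTEM]", "IMPORTANT INSTRUCTION FOR AI"].foldl
    (fun c phrase => PySem.Str.replace c phrase "[FILTERED]") content

-- ===== PORT B =====
-- scrub(text, phrases): recursion over the phrase list, split/join per pass
def scrubB : String → List String → String
  | text, [] => text
  | text, p :: ps =>
      scrubB (PySem.Str.join "[FILTERED]" ((PySem.Str.split? text p).getD [])) ps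

def sanitize_content_py_alt (content : String) : String :=
  let content :=
    if PySem.Str.len content > 2000 then
      PySem.Str.slice content none (some 2000) ++ "... [truncated]"
    else content
  scrubB content
    ["SYSTEM INSTRUCTION:", "IGNORE PREVIOUS", "NEW INSTRUCTION:",
     "OVERRIDE:", "[SYSTEM]", "IMPORTANT INSTRUCTION FOR AI"]

-- ===== PRECONDITION & SPEC =====
def Spec_sanitize_content_py (content : String) (out : String) : Prop := out = sanitize_content_py_alt content
instance (content : String) (out : String) : Decidable (Spec_sanitize_content_py content out) := by unfold Spec_sanitize_content_py; infer_instance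

-- ===== CLAIM (what is proved, stated in full; the proofs are below) =====
def Claim_equal_sanitize_content_py : Prop := ∀ (content : String), Dom_sanitize_content_py content → Spec_sanitize_content_py content (sanitize_content_py content)

-- ===== LEMMAS AND PROOFS =====

-- A fueled, accumulator-free splitter; both PySem.Chars.replace.go and
-- PySem.Chars.splitOn.go are characterised through it.
def mySplit (sep : List Char) : Nat → List Char → List (List Char)
  | 0, l => [l]
  | _+1, [] => [[]]
  | f+1, c::t =>
    if sep.isPrefixOf (c::t) then [] :: mySplit sep f ((c::t).drop sep.length)
    else match mySplit sep f t with
      | h :: t' => (c::h) :: t'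
      | [] => [[c]]

theorem intercalate_cons₂ (new hd x : List Char) (xs : List (List Char)) :
    new.intercalate (hd :: x :: xs) = hd ++ new ++ new.intercalate (x :: xs) := by
  simp [List.intercalate, List.intersperse]

theorem mySplit_ne_nil (sep : List Char) : ∀ f l, mySplit sep f l ≠ [] := by
  intro f
  induction f with
  | zero => intro l; simp [mySplit]
  | succ f ih =>
    intro l
    cases l with
    | nil => simp [mySplit]
    | cons c t =>
      simp only [mySplit]
      split
      · simp
      · split
        · simp
        · simp

theorem repgo_eq (sep new : List Char) : ∀ f l acc,
    PySem.Chars.replace.go sep new f l acc = acc.reverse ++ List.intercalate new (mySplit sep f l) := by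
  intro f
  induction f with
  | zero => intro l acc; simp [PySem.Chars.replace.go, mySplit, List.intercalate]
  | succ f ih =>
    intro l acc
    cases l with
    | nil => simp [PySem.Chars.replace.go, mySplit, List.intercalate]
    | cons c t =>
      simp only [PySem.Chars.replace.go, mySplit]
      split
      · rw [ih]
        rcases h : mySplit sep f ((c::t).drop sep.length) with _ | ⟨hd, tl⟩
        · exact absurd h (mySplit_ne_nil sep f _)
        · rw [intercalate_cons₂]; simp
      · rw [ih]
        rcases h : mySplit sep f t with _ | ⟨hd, tl⟩
        · exact absurd h (mySplit_ne_nil sep f t)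
        · cases tl with
          | nil => simp [List.intercalate]
          | cons x xs => rw [intercalate_cons₂, intercalate_cons₂]; simp

theorem splitgo_eq (sep : List Char) : ∀ f l cur acc,
    PySem.Chars.splitOn.go sep f l cur acc =
      acc.reverse ++ (match mySplit sep f l with
        | h :: t => (cur.reverse ++ h) :: t
        | [] => [cur.reverse]) := by
  intro f
  induction f with
  | zero => intro l cur acc; simp [PySem.Chars.splitOn.go, mySplit]
  | succ f ih =>
    intro l cur acc
    cases l with
    | nil => simp [PySem.Chars.splitOn.go, mySplit]
    | cons c t =>
      simp only [PySem.Chars.splitOn.go, mySplit]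
      split
      · rw [ih]
        rcases h : mySplit sep f ((c::t).drop sep.length) with _ | ⟨hd, tl⟩
        · exact absurd h (mySplit_ne_nil sep f _)
        · simp
      · rw [ih]
        rcases h : mySplit sep f t with _ | ⟨hd, tl⟩
        · exact absurd h (mySplit_ne_nil sep f t)
        · simp

theorem mySplit_fuel (sep : List Char) (hsep : sep ≠ []) : ∀ f f' l, l.length ≤ f → l.length ≤ f' →
    mySplit sep f l = mySplit sep f' l := by
  intro f
  induction f with
  | zero =>
    intro f' l hf hf'
    have : l = [] := by cases l <;> simp_all
    subst this
    cases f' <;> simp [mySplit]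
  | succ f ih =>
    intro f' l hf hf'
    cases l with
    | nil => cases f' <;> simp [mySplit]
    | cons c t =>
      cases f' with
      | zero => simp at hf'
      | succ f' =>
        simp only [mySplit]
        split
        · rename_i hp
          have hs1 : 1 ≤ sep.length := by cases sep <;> simp_all
          rw [ih f' _ (by simp at hf ⊢; omega) (by simp at hf' ⊢; omega)]
        · rw [ih f' t (by simp at hf; omega) (by simp at hf'; omega)]

theorem replace_eq_join_splitOn (s sep new : List Char) (hsep : sep ≠ []) :
    PySem.Chars.replace s sep new = PySem.Chars.join new (PySem.Chars.splitOn s sep) := by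
  rw [PySem.Chars.replace, PySem.Chars.splitOn, PySem.Chars.join]
  rw [if_neg (by simp [List.isEmpty_iff, hsep])]
  rw [repgo_eq, splitgo_eq]
  rcases h : mySplit sep (s.length + 1) s with _ | ⟨hd, tl⟩
  · exact absurd h (mySplit_ne_nil sep _ s)
  · rw [mySplit_fuel sep hsep s.length (s.length+1) s le_rfl (by omega), h]
    simp

theorem str_replace_eq_join_split (t p : String) (hp : p.toList ≠ []) :
    PySem.Str.replace t p "[FILTERED]" =
      PySem.Str.join "[FILTERED]" ((PySem.Str.split? t p).getD []) := by
  rw [PySem.Str.replace, PySem.Str.join, PySem.Str.split?, PySem.Chars.split?]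
  rw [if_neg (by simp [List.isEmpty_iff, hp])]
  rw [replace_eq_join_splitOn _ _ _ hp]
  congr 1
  simp only [Option.map_some, Option.getD_some, List.map_map]
  simp [Function.comp_def, String.toList_ofList]

theorem foldl_replace_eq_scrubB : ∀ (ps : List String) (t : String),
    (∀ p ∈ ps, p.toList ≠ []) →
    ps.foldl (fun c phrase => PySem.Str.replace c phrase "[FILTERED]") t = scrubB t ps := by
  intro ps
  induction ps with
  | nil => intro t _; simp [scrubB]
  | cons p ps ih =>
    intro t h
    simp only [List.foldl, scrubB]
    rw [str_replace_eq_join_split t p (h p (by simp))]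
    exact ih _ (fun q hq => h q (by simp [hq]))

-- ===== VERDICT (by name: the statement is the Claim_ definition above) =====
theorem sanitize_content_py_spec : Claim_equal_sanitize_content_py := by
  intro content _
  unfold Spec_sanitize_content_py sanitize_content_py sanitize_content_py_alt
  exact foldl_replace_eq_scrubB _ _ (by decide)
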